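-- pv_equiv track=rewrite | github.com/holi-lab/NCUser | multiwoz_env/train_fin.py | split_into_sft_examples
-- ===== SOURCE A (Python) =====
-- from typing import List, Dict, Any, Tuple
--
-- def split_into_sft_examples(conv: List[Dict[str, str]]) -> List[List[Dict[str, str]]]:
--     """
--     Make train sample for each 'assistant' turn in conv
--     Each sample:
--       - prompt: history before ith assistant turn(includes system+user+assistant)
--       - target: ith assistant message
--     """
--     examples = []
--     history: List[Dict[str, str]] = []
--     for msg in conv:
--         if msg["role"] == "assistant":
--             example = history + [msg]
--             examples.append(example)
--         history = history + [msg]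
--     return examples
-- ===== SOURCE B (Python) =====
-- def split_into_sft_examples(conv):
--     """Each example is simply the prefix of conv up to and including an assistant turn."""
--     return [conv[:i + 1] for i, m in enumerate(conv) if m["role"] == "assistant"]
-- ===== Notes on version B (the rewrite author's own statement) =====
-- stated objective: simpler
-- what changed: Replaces the running history accumulator and quadratic history copying with a stateless comprehension that slices the prefix conv[:i+1] at each assistant turn.
import Mathlib
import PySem

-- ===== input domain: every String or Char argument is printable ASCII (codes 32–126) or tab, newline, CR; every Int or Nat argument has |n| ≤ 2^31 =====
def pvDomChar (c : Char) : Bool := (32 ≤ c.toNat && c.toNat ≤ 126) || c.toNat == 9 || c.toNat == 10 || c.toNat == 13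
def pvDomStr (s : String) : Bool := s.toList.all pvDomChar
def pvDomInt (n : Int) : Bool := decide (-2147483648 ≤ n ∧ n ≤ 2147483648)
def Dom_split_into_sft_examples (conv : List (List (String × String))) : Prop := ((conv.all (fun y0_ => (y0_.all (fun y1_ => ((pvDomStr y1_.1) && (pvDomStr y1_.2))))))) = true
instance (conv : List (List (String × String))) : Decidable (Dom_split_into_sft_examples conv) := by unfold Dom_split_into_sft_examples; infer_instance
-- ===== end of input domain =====

-- B drops A's running history accumulator: it emits the slice conv[:i+1] at each assistant
-- turn via a stateless comprehension (objective: simpler). Same return value on Pre_.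

-- ===== PORT A =====
-- msg["role"]: first-match association-list lookup (dicts have unique keys; Pre_ excludes a missing key)
def pvRole? (msg : List (String × String)) : Option String :=
  (msg.find? (fun kv => kv.1 == "role")).map (·.2)

def split_into_sft_examples (conv : List (List (String × String))) : List (List (List (String × String))) :=
  (conv.foldl
    (fun (st : List (List (List (String × String))) × List (List (String × String))) msg =>
      let examples := if pvRole? msg = some "assistant" then st.1 ++ [st.2 ++ [msg]] else st.1
      (examples, st.2 ++ [msg]))
    ([], [])).1

-- ===== PORT B =====
def split_into_sft_examples_alt (conv : List (List (String × String))) : List (List (List (String × String))) :=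
  (PySem.List.enumerate conv).filterMap
    (fun p => if pvRole? p.2 = some "assistant" then some (PySem.List.slice conv none (some (p.1 + 1))) else none)

-- ===== PRECONDITION & SPEC =====
-- Pre_ excludes exactly the inputs where some message has no "role" key: there Python A (and B) raise KeyError.
def Pre_split_into_sft_examples (conv : List (List (String × String))) : Prop :=
  conv.all (fun msg => msg.any (fun kv => kv.1 == "role")) = true
instance (conv : List (List (String × String))) : Decidable (Pre_split_into_sft_examples conv) := by unfold Pre_split_into_sft_examples; infer_instance

def pvWitness_split_into_sft_examples : (List (List (String × String))) :=
  [[("role", "user"), ("content", "hi")], [("role", "assistant"), ("content", "hello")]]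

def Spec_split_into_sft_examples (conv : List (List (String × String))) (out : List (List (List (String × String)))) : Prop := out = split_into_sft_examples_alt conv
instance (conv : List (List (String × String))) (out : List (List (List (String × String)))) : Decidable (Spec_split_into_sft_examples conv out) := by unfold Spec_split_into_sft_examples; infer_instance

-- ===== CLAIM (what is proved, stated in full; the proofs are below) =====
def Claim_equal_split_into_sft_examples : Prop := ∀ (conv : List (List (String × String))), Dom_split_into_sft_examples conv → Pre_split_into_sft_examples conv → Spec_split_into_sft_examples conv (split_into_sft_examples conv)

-- ===== LEMMAS AND PROOFS =====

-- A's loop, with the accumulated examples pulled out and the history made explicit.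
def pvAux (pre : List (List (String × String))) : List (List (String × String)) → List (List (List (String × String)))
  | [] => []
  | m :: ms =>
      (if pvRole? m = some "assistant" then [pre ++ [m]] else []) ++ pvAux (pre ++ [m]) ms

theorem pvFoldl_eq_aux (conv : List (List (String × String)))
    (ex : List (List (List (String × String)))) (pre : List (List (String × String))) :
    (conv.foldl
      (fun (st : List (List (List (String × String))) × List (List (String × String))) msg =>
        let examples := if pvRole? msg = some "assistant" then st.1 ++ [st.2 ++ [msg]] else st.1
        (examples, st.2 ++ [msg]))
      (ex, pre)).1 = ex ++ pvAux pre conv := by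
  induction conv generalizing ex pre with
  | nil => simp [pvAux]
  | cons m ms ih =>
      simp only [List.foldl_cons, pvAux]
      rw [ih]
      by_cases h : pvRole? m = some "assistant" <;> simp [h]

theorem pvAux_eq_filterMap (conv pre : List (List (String × String))) :
    pvAux pre conv = (PySem.List.enumerate conv (pre.length : Int)).filterMap
      (fun p => if pvRole? p.2 = some "assistant" then some ((pre ++ conv).take (p.1.toNat + 1)) else none) := by
  induction conv generalizing pre with
  | nil => simp [pvAux, PySem.List.enumerate_nil]
  | cons m ms ih =>
      rw [pvAux, PySem.List.enumerate_cons, List.filterMap_cons]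
      have htake : (pre ++ m :: ms).take (pre.length + 1) = pre ++ [m] := by
        simp [List.take_append]
      have hcast : (pre.length : Int) + 1 = ((pre ++ [m]).length : Int) := by
        simp
      rw [hcast, ih (pre ++ [m])]
      by_cases h : pvRole? m = some "assistant" <;>
        simp [h, htake, List.append_assoc]

theorem pvAlt_eq_filterMap (conv : List (List (String × String))) :
    split_into_sft_examples_alt conv = (PySem.List.enumerate conv (0 : Int)).filterMap
      (fun p => if pvRole? p.2 = some "assistant" then some (conv.take (p.1.toNat + 1)) else none) := by
  unfold split_into_sft_examples_alt
  apply List.filterMap_congr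
  intro p hp
  rcases (PySem.List.mem_enumerate_iff conv 0 p).1 hp with ⟨k, hk, rfl⟩
  have : PySem.List.slice conv none (some ((0 : Int) + (k : Int) + 1)) = conv.take (((0 : Int) + (k : Int)).toNat + 1) := by
    rw [PySem.List.slice_to conv (by omega)]
    norm_num
  rw [this]

-- ===== VERDICT (by name: the statement is the Claim_ definition above) =====
theorem split_into_sft_examples_spec : Claim_equal_split_into_sft_examples := by
  intro conv _ _
  show split_into_sft_examples conv = split_into_sft_examples_alt conv
  rw [split_into_sft_examples, pvFoldl_eq_aux, pvAux_eq_filterMap, pvAlt_eq_filterMap]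
  simp
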